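-- pv_equiv track=rewrite | github.com/Lapuskin/Labs | BoolMinimization/calculation_method.py | check_on_extra_implicants_pdnf
-- ===== SOURCE A (Python) =====
-- from copy import deepcopy
--
-- def check_on_extra_implicants_pdnf(cut_back_formula):
--     temp_expression = ''
--     temp_cut_back_formula = deepcopy(cut_back_formula)
--     for i in cut_back_formula:
--         if str(i).isdigit():
--             continue
--         if i[0] != '!' and '!' + i in temp_cut_back_formula:
--             temp_cut_back_formula.remove(i)
--             temp_cut_back_formula.remove('!' + i)
--             temp_expression = '1'
--     for i in temp_cut_back_formula:
--         temp_expression = logic_or(i, temp_expression)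
--
--     if temp_expression == '1':
--         return True
--     return False
--
-- def logic_or(first, second):
--     if first == second:
--         return first
--     if second.isdigit() and first.isdigit():
--         return str(int(first) or int(second))
--     if first[0] == 'x' or first[0] == '!':
--         if second == '1':
--             return '1'
--         else:
--             return first
--     else:
--         if first != '1':
--             return second
--         else:
--             return '1'
-- ===== SOURCE B (Python) =====
-- # The cut-back PDNF is logically 1 exactly when it contains the constant '1'
-- # or a complementary pair t, '!'+t: one set and two membership queries replace
-- # A's mutated-copy removal loop and its logic_or string fold (objective: faster).
-- def check_on_extra_implicants_pdnf(cut_back_formula):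
--     terms = set(cut_back_formula)
--     if '1' in terms:
--         return True
--     return any(not t.isdigit() and t[0] != '!' and '!' + t in terms
--                for t in terms)
-- ===== Notes on version B (the rewrite author's own statement) =====
-- stated objective: faster
-- what changed: B builds one set of terms and answers by membership — the constant '1' present, or some positive literal t with '!'+t also present — replacing A's quadratic mutated-copy removal loop ('in'/.remove scans) and its string-building logic_or fold; Pre_ excludes lists containing the empty string (A raises IndexError at i[0]) and lists with numeric tokens other than '0'/'1', which are not PDNF implicants and on which logic_or's string arithmetic ('1' or '2' -> '2') gives accidental values.
-- outside the precondition, e.g. on check_on_extra_implicants_pdnf(['1', '2']): A returns False, B returns True; on check_on_extra_implicants_pdnf(['01']): A returns False, B returns False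
import Mathlib
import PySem

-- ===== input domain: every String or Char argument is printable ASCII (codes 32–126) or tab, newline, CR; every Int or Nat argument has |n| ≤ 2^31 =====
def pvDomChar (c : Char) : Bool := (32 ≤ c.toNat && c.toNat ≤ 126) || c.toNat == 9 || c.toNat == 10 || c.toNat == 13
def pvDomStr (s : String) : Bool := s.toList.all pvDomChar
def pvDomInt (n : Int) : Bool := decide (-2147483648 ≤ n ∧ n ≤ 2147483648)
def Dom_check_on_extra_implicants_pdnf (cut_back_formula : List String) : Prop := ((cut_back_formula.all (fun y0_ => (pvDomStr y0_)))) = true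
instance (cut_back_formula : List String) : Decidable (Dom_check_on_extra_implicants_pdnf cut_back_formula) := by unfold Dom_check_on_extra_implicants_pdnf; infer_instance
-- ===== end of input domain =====

-- B answers by set membership (constant '1' present, or a complementary pair t / '!'+t)
-- instead of A's mutated-copy removal loop and string-building logic_or fold
-- (objective: faster).

-- ===== PORT A =====

-- int(s) for s with s.isdigit() == True (Source A applies int() only under that guard;
-- exact there).
def pyIntOfDigits (s : String) : Int :=
  s.toList.foldl (fun a c => a * 10 + ((c.toNat : Int) - 48)) 0

-- logic_or(first, second), step for step
def logicOr (first second : String) : String :=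
  if first = second then first
  else if PySem.Str.strIsdigit second && PySem.Str.strIsdigit first then
    -- str(int(first) or int(second))
    (if pyIntOfDigits first ≠ 0 then PySem.Int.toStr (pyIntOfDigits first)
     else PySem.Int.toStr (pyIntOfDigits second))
  else if PySem.Str.pyGet? first 0 = some 'x' ∨ PySem.Str.pyGet? first 0 = some '!' then
    if second = "1" then "1" else first
  else if first ≠ "1" then second else "1"

-- one iteration of A's first loop; state = (temp_cut_back_formula, temp_expression).
-- i[0] is Str.pyGet? i 0 (for i = "" Python raises IndexError: such inputs are outside
-- Pre_); list.remove is PySem.List.remove? — both removed elements are present whenever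
-- the branch fires (proved below), so the .getD fallback is never taken.
def aStep (st : List String × String) (i : String) : List String × String :=
  if PySem.Str.strIsdigit i then st
  else if PySem.Str.pyGet? i 0 ≠ some '!' ∧ st.1.contains ("!" ++ i) then
    ((PySem.List.remove? ((PySem.List.remove? st.1 i).getD st.1) ("!" ++ i)).getD
       ((PySem.List.remove? st.1 i).getD st.1), "1")
  else st

def check_on_extra_implicants_pdnf (cut_back_formula : List String) : Bool :=
  let st := cut_back_formula.foldl aStep (cut_back_formula, "")
  let e := st.1.foldl (fun acc i => logicOr i acc) st.2
  decide (e = "1")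

-- ===== PORT B =====

-- Source B: terms = set(...); '1' in terms, else any(... for t in terms) — the any over
-- the set is order-independent (an existence test), ported over the Set's list.
def check_on_extra_implicants_pdnf_alt (cut_back_formula : List String) : Bool :=
  let terms := PySem.Set.ofList cut_back_formula
  if PySem.Set.contains terms "1" then true
  else terms.any (fun t =>
    !(PySem.Str.strIsdigit t) && !(PySem.Str.pyGet? t 0 == some '!') &&
      PySem.Set.contains terms ("!" ++ t))

-- ===== PRECONDITION & SPEC =====
-- Pre_ excludes lists containing the empty string (A raises IndexError at i[0]) and
-- lists with numeric tokens other than '0'/'1' — such tokens are not PDNF implicants,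
-- and on them logic_or's string arithmetic ('1' or '2' -> '2') gives accidental values.
def Pre_check_on_extra_implicants_pdnf (cut_back_formula : List String) : Prop :=
  "" ∉ cut_back_formula ∧
    ∀ s ∈ cut_back_formula, PySem.Str.strIsdigit s = true → s = "0" ∨ s = "1"
instance (cut_back_formula : List String) : Decidable (Pre_check_on_extra_implicants_pdnf cut_back_formula) := by unfold Pre_check_on_extra_implicants_pdnf; infer_instance

def pvWitness_check_on_extra_implicants_pdnf : List String := ["x1", "!x1", "x2"]

def Spec_check_on_extra_implicants_pdnf (cut_back_formula : List String) (out : Bool) : Prop := out = check_on_extra_implicants_pdnf_alt cut_back_formula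
instance (cut_back_formula : List String) (out : Bool) : Decidable (Spec_check_on_extra_implicants_pdnf cut_back_formula out) := by unfold Spec_check_on_extra_implicants_pdnf; infer_instance

-- ===== CLAIM (what is proved, stated in full; the proofs are below) =====
def Claim_equal_check_on_extra_implicants_pdnf : Prop := ∀ (cut_back_formula : List String), Dom_check_on_extra_implicants_pdnf cut_back_formula → Pre_check_on_extra_implicants_pdnf cut_back_formula → Spec_check_on_extra_implicants_pdnf cut_back_formula (check_on_extra_implicants_pdnf cut_back_formula)

-- ===== LEMMAS AND PROOFS =====

-- ---- proof-side notions ----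

-- '!' + s
def bangS (s : String) : String := "!" ++ s
-- s[1:], proof-side (names the variable a '!…' token belongs to)
def tailS (s : String) : String := String.ofList s.toList.tail
-- "s can be removed in A's first loop as the positive literal of a pair"
def posB (s : String) : Bool :=
  !(PySem.Str.strIsdigit s) && !(PySem.Str.pyGet? s 0 == some '!')
-- how many leading occurrences of each value are gone from temp after A processed prefix p
def sigmaP (F p : List String) (s : String) : Nat :=
  if posB s then min (p.count s) (F.count (bangS s))
  else if PySem.Str.pyGet? s 0 = some '!' ∧ posB (tailS s) then
    min (p.count (tailS s)) (F.count s)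
  else 0
-- has A's first loop already found a complementary pair after prefix p?
def pairB (F p : List String) : Bool :=
  p.any (fun t => posB t && decide (0 < F.count (bangS t)))
-- F with the first (σ s) occurrences of each s dropped
def updF (σ : String → Nat) (x : String) (n : Nat) : String → Nat :=
  fun s => if s = x then n else σ s
def dropSkips (σ : String → Nat) : List String → List String
  | [] => []
  | x :: xs => if σ x > 0 then dropSkips (updF σ x (σ x - 1)) xs else x :: dropSkips σ xs
-- the shapes temp_expression can take under Pre_: '', '1', or a token headed 'x'/'!'
def SState (e : String) : Prop :=
  e = "" ∨ e = "1" ∨ PySem.Str.pyGet? e 0 = some 'x' ∨ PySem.Str.pyGet? e 0 = some '!'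

-- ---- basic string facts ----

lemma toList_bangS (s : String) : (bangS s).toList = '!' :: s.toList := by
  simp [bangS]

lemma pyGet?_bangS (s : String) : PySem.Str.pyGet? (bangS s) 0 = some '!' := by
  simp [PySem.Str.pyGet?, toList_bangS]

lemma tailS_bangS (s : String) : tailS (bangS s) = s := by
  simp [tailS, toList_bangS]

lemma head_of_pyGet?_zero {s : String} {c : Char} (h : PySem.Str.pyGet? s 0 = some c) :
    s.toList = c :: s.toList.tail := by
  simp [PySem.Str.pyGet?, PySem.List.pyGet?_zero] at h
  cases hl : s.toList with
  | nil => rw [hl] at h; simp at h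
  | cons a l => rw [hl] at h; simp at h; simp [h]

lemma eq_bangS_tailS {s : String} (h : PySem.Str.pyGet? s 0 = some '!') :
    s = bangS (tailS s) := by
  apply String.toList_inj.mp
  rw [toList_bangS]
  simp [tailS]
  exact head_of_pyGet?_zero h

lemma strIsdigit_iff (s : String) :
    PySem.Str.strIsdigit s = true ↔ s.toList ≠ [] ∧ ∀ c ∈ s.toList, PySem.Chars.isdigit c := by
  simp [PySem.Str.strIsdigit_eq, PySem.Chars.strIsdigit]

lemma posB_bangS (s : String) : posB (bangS s) = false := by
  have := pyGet?_bangS s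
  simp only [PySem.Str.pyGet?, PySem.Chars.pyGet?_eq_listPyGet?] at this
  simp [posB, PySem.Str.pyGet?, this]

lemma bangS_ne_self (s : String) : bangS s ≠ s := by
  intro h
  have := congrArg (fun t => t.toList.length) h
  simp [toList_bangS] at this

lemma headVar_facts {e : String}
    (h : PySem.Str.pyGet? e 0 = some 'x' ∨ PySem.Str.pyGet? e 0 = some '!') :
    PySem.Str.strIsdigit e = false ∧ e ≠ "1" ∧ e ≠ "" := by
  rcases h with h | h <;>
  · have hl := head_of_pyGet?_zero h
    refine ⟨?_, ?_, ?_⟩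
    · rw [Bool.eq_false_iff]
      intro hd
      rw [strIsdigit_iff] at hd
      have := hd.2 _ (hl ▸ List.mem_cons_self)
      simp [PySem.Chars.isdigit] at this
    · intro he; rw [he] at hl; simp at hl
    · intro he; rw [he] at hl; simp at hl

-- ---- dropSkips bookkeeping (A's first loop as an abstract skip function) ----

lemma dropSkips_congr {σ τ : String → Nat} (h : ∀ s, σ s = τ s) (F : List String) :
    dropSkips σ F = dropSkips τ F := by
  induction F generalizing σ τ with
  | nil => rfl
  | cons x xs ih =>
    simp only [dropSkips, h x]
    by_cases hx : τ x > 0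
    · simp only [if_pos hx]
      exact ih (fun s => by simp [updF, h s])
    · simp only [if_neg hx]
      rw [ih h]

lemma dropSkips_zero (F : List String) : dropSkips (fun _ => 0) F = F := by
  induction F with
  | nil => rfl
  | cons x xs ih => simp [dropSkips, ih]

lemma count_dropSkips (σ : String → Nat) (F : List String) (s : String) :
    (dropSkips σ F).count s = F.count s - σ s := by
  induction F generalizing σ with
  | nil => simp [dropSkips]
  | cons x xs ih =>
    simp only [dropSkips]
    by_cases hx : σ x > 0
    · rw [if_pos hx, ih]
      by_cases hsx : s = x
      · subst hsx
        simp [updF, List.count_cons_self]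
        omega
      · simp only [updF, if_neg hsx]
        rw [List.count_cons_of_ne (Ne.symm hsx)]
    · rw [if_neg hx]
      by_cases hsx : s = x
      · subst hsx
        rw [List.count_cons_self, List.count_cons_self, ih]
        omega
      · rw [List.count_cons_of_ne (Ne.symm hsx), List.count_cons_of_ne (Ne.symm hsx), ih]

lemma mem_dropSkips {x : String} {F : List String} : ∀ {σ : String → Nat},
    x ∈ dropSkips σ F → x ∈ F := by
  induction F with
  | nil => intro σ h; simp [dropSkips] at h
  | cons y ys ih =>
    intro σ h
    simp only [dropSkips] at h
    by_cases hy : σ y > 0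
    · rw [if_pos hy] at h
      exact List.mem_cons_of_mem _ (ih h)
    · rw [if_neg hy] at h
      rcases List.mem_cons.mp h with h | h
      · exact h ▸ List.mem_cons_self
      · exact List.mem_cons_of_mem _ (ih h)

lemma remove?_dropSkips {F : List String} : ∀ {σ : String → Nat} {s : String},
    σ s < F.count s →
    PySem.List.remove? (dropSkips σ F) s = some (dropSkips (updF σ s (σ s + 1)) F) := by
  induction F with
  | nil => intro σ s h; simp at h
  | cons x xs ih =>
    intro σ s h
    by_cases hsx : x = s
    · subst hsx
      simp only [dropSkips]
      have hpos : updF σ x (σ x + 1) x > 0 := by simp [updF]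
      rw [if_pos hpos]
      by_cases hx : σ x > 0
      · rw [if_pos hx]
        have hcnt : (updF σ x (σ x - 1)) x < xs.count x := by
          simp [updF]
          rw [List.count_cons_self] at h
          omega
        rw [ih hcnt]
        congr 1
        refine dropSkips_congr (fun t => ?_) xs
        simp only [updF]
        by_cases ht : t = x <;> simp [ht] <;> omega
      · rw [if_neg hx, PySem.List.remove?_cons_self]
        congr 1
        refine dropSkips_congr (fun t => ?_) xs
        simp only [updF]
        by_cases ht : t = x <;> simp [ht] <;> omega
    · have hne : s ≠ x := fun hc => hsx hc.symm
      have hcount : σ s < xs.count s := by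
        rwa [List.count_cons_of_ne hsx] at h
      simp only [dropSkips]
      by_cases hx : σ x > 0
      · have hx' : updF σ s (σ s + 1) x > 0 := by
          simp only [updF, if_neg hsx]; exact hx
        rw [if_pos hx, if_pos hx']
        have hcnt : (updF σ x (σ x - 1)) s < xs.count s := by
          simp only [updF, if_neg hne]; exact hcount
        rw [ih hcnt]
        congr 1
        refine dropSkips_congr (fun t => ?_) xs
        simp only [updF]
        by_cases ht : t = x <;> by_cases ht2 : t = s <;>
          simp [ht, ht2, hsx, hne] <;> omega
      · have hx' : ¬ (updF σ s (σ s + 1) x > 0) := by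
          simp only [updF, if_neg hsx]; exact hx
        rw [if_neg hx, if_neg hx']
        rw [PySem.List.remove?_cons_of_ne _ hsx, ih hcount]
        rfl

lemma sigmaP_append_notpos {F p : List String} {i : String} (hpos : posB i = false) :
    (∀ s, sigmaP F (p ++ [i]) s = sigmaP F p s) ∧ pairB F (p ++ [i]) = pairB F p := by
  constructor
  · intro s
    unfold sigmaP
    by_cases hps : posB s
    · rw [if_pos hps, if_pos hps]
      have hsi : s ≠ i := fun hc => by simp [hc, hpos] at hps
      rw [List.count_append]
      have : List.count s [i] = 0 := by
        simp [List.count_singleton]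
        exact fun hc => hsi hc.symm
      omega
    · rw [if_neg hps, if_neg hps]
      by_cases hcb : PySem.Str.pyGet? s 0 = some '!' ∧ posB (tailS s)
      · rw [if_pos hcb, if_pos hcb]
        have hti : tailS s ≠ i := fun hc => by
          rw [hc] at hcb; rw [hpos] at hcb; exact absurd hcb.2 (by simp)
        rw [List.count_append]
        have : List.count (tailS s) [i] = 0 := by
          simp [List.count_singleton]
          exact fun hc => hti hc.symm
        omega
      · rw [if_neg hcb, if_neg hcb]
  · unfold pairB
    rw [List.any_append]
    simp [hpos]

lemma pairB_append (F p : List String) (i : String) :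
    pairB F (p ++ [i]) = (pairB F p || (posB i && decide (0 < F.count (bangS i)))) := by
  unfold pairB
  rw [List.any_append]
  simp

lemma count_append_singleton_self (p : List String) (i : String) :
    (p ++ [i]).count i = p.count i + 1 := by
  simp [List.count_append]

lemma count_append_singleton_ne {p : List String} {s i : String} (h : s ≠ i) :
    (p ++ [i]).count s = p.count s := by
  rw [List.count_append]
  have : List.count s [i] = 0 := by
    simp [List.count_singleton]
    exact fun hc => h hc.symm
  omega

lemma updF_self (σ : String → Nat) (x : String) (n : Nat) : updF σ x n x = n := by
  simp [updF]

lemma updF_ne {s x : String} (σ : String → Nat) (n : Nat) (h : s ≠ x) :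
    updF σ x n s = σ s := by
  simp [updF, h]

lemma sigmaP_pos_eq (F q : List String) {i : String} (hpos : posB i = true) :
    sigmaP F q i = min (q.count i) (F.count (bangS i)) := by
  unfold sigmaP
  rw [if_pos hpos]

lemma sigmaP_bang_eq (F q : List String) {i : String} (hpos : posB i = true) :
    sigmaP F q (bangS i) = min (q.count i) (F.count (bangS i)) := by
  unfold sigmaP
  rw [if_neg (by simp [posB_bangS]),
    if_pos ⟨pyGet?_bangS i, by rw [tailS_bangS]; exact hpos⟩, tailS_bangS]

lemma sigmaP_append_other (F p : List String) {i s : String} (hsi : s ≠ i)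
    (hsb : s ≠ bangS i) : sigmaP F (p ++ [i]) s = sigmaP F p s := by
  unfold sigmaP
  by_cases hps : posB s
  · rw [if_pos hps, if_pos hps, count_append_singleton_ne hsi]
  · rw [if_neg hps, if_neg hps]
    by_cases hcb : PySem.Str.pyGet? s 0 = some '!' ∧ posB (tailS s)
    · rw [if_pos hcb, if_pos hcb]
      have hts : tailS s ≠ i := fun hc => hsb (by rw [eq_bangS_tailS hcb.1, hc])
      rw [count_append_singleton_ne hts]
    · rw [if_neg hcb, if_neg hcb]

-- the single-step invariant of A's first loop
lemma aStep_prefix (F p : List String) (i : String) (hcnt : p.count i < F.count i) :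
    aStep (dropSkips (sigmaP F p) F, if pairB F p then "1" else "") i =
      (dropSkips (sigmaP F (p ++ [i])) F, if pairB F (p ++ [i]) then "1" else "") := by
  by_cases hd : PySem.Str.strIsdigit i
  · have hpos : posB i = false := by simp only [posB, hd]; simp
    obtain ⟨h1, h2⟩ := sigmaP_append_notpos (F := F) (p := p) hpos
    rw [aStep, if_pos hd, dropSkips_congr h1, h2]
  · by_cases hb : PySem.Str.pyGet? i 0 = some '!'
    · have hpos : posB i = false := by simp only [posB, hb]; simp
      obtain ⟨h1, h2⟩ := sigmaP_append_notpos (F := F) (p := p) hpos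
      rw [aStep, if_neg hd, if_neg (fun hc => hc.1 hb), dropSkips_congr h1, h2]
    · have hd' : PySem.Str.strIsdigit i = false := Bool.eq_false_iff.mpr hd
      have hb' : PySem.List.pyGet? i.toList 0 ≠ some '!' := by
        simpa only [PySem.Str.pyGet?, PySem.Chars.pyGet?_eq_listPyGet?] using hb
      have hpos : posB i = true := by
        unfold posB
        rw [hd']
        simp [hb']
      have hbang : "!" ++ i = bangS i := rfl
      have hib : i ≠ bangS i := fun hc => bangS_ne_self i hc.symm
      have hbi : bangS i ≠ i := bangS_ne_self i
      have hmem : (dropSkips (sigmaP F p) F).contains (bangS i) =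
          decide (p.count i < F.count (bangS i)) := by
        rcases Nat.lt_or_ge (p.count i) (F.count (bangS i)) with hlt | hge
        · have : 0 < (dropSkips (sigmaP F p) F).count (bangS i) := by
            rw [count_dropSkips, sigmaP_bang_eq F p hpos]
            omega
          have hm := List.count_pos_iff.mp this
          simp [hm, hlt]
        · have : (dropSkips (sigmaP F p) F).count (bangS i) = 0 := by
            rw [count_dropSkips, sigmaP_bang_eq F p hpos]
            omega
          have hm : bangS i ∉ dropSkips (sigmaP F p) F := by
            intro hc
            exact absurd (List.count_pos_iff.mpr hc) (by omega)
          simp [hm]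
          omega
      rcases Nat.lt_or_ge (p.count i) (F.count (bangS i)) with hlt | hge
      · -- pair found: both removes happen
        have hc1 : sigmaP F p i < F.count i := by rw [sigmaP_pos_eq F p hpos]; omega
        have hr1 := remove?_dropSkips (σ := sigmaP F p) (s := i) hc1
        have hc2 : (updF (sigmaP F p) i (sigmaP F p i + 1)) (bangS i) < F.count (bangS i) := by
          rw [updF, if_neg hbi, sigmaP_bang_eq F p hpos]
          omega
        have hr2 := remove?_dropSkips
          (σ := updF (sigmaP F p) i (sigmaP F p i + 1)) (s := bangS i) hc2
        rw [aStep, if_neg hd, if_pos ⟨hb, by rw [hbang, hmem]; simp [hlt]⟩, hbang, hr1]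
        simp only [Option.getD_some]
        rw [hr2]
        simp only [Option.getD_some]
        refine Prod.ext ?_ ?_
        · simp only
          refine dropSkips_congr (fun s => ?_) F
          by_cases hsi : s = i
          · subst hsi
            rw [updF_ne _ _ hib, updF_self]
            rw [sigmaP_pos_eq F p hpos, sigmaP_pos_eq F (p ++ [s]) hpos,
              count_append_singleton_self]
            omega
          · by_cases hsb : s = bangS i
            · subst hsb
              rw [updF_self, updF_ne _ _ hbi]
              rw [sigmaP_bang_eq F p hpos, sigmaP_bang_eq F (p ++ [i]) hpos,
                count_append_singleton_self]
              omega
            · rw [updF_ne _ _ hsb, updF_ne _ _ hsi]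
              exact (sigmaP_append_other F p hsi hsb).symm
        · simp only
          rw [pairB_append]
          have : (posB i && decide (0 < F.count (bangS i))) = true := by
            rw [hpos, Bool.true_and]
            exact decide_eq_true (by omega)
          rw [this, Bool.or_true]
          simp
      · -- no pair for i: nothing happens
        rw [aStep, if_neg hd, if_neg (by
          rw [hbang, hmem]
          intro hc
          have := of_decide_eq_true hc.2
          omega)]
        have h1 : ∀ s, sigmaP F (p ++ [i]) s = sigmaP F p s := by
          intro s
          by_cases hsi : s = i
          · subst hsi
            rw [sigmaP_pos_eq F p hpos, sigmaP_pos_eq F (p ++ [s]) hpos,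
              count_append_singleton_self]
            omega
          · by_cases hsb : s = bangS i
            · subst hsb
              rw [sigmaP_bang_eq F p hpos, sigmaP_bang_eq F (p ++ [i]) hpos,
                count_append_singleton_self]
              omega
            · exact sigmaP_append_other F p hsi hsb
        rw [dropSkips_congr h1, pairB_append]
        by_cases hcb0 : 0 < F.count (bangS i)
        · have hip : (0:Nat) < p.count i := by omega
          have hmemp : i ∈ p := List.count_pos_iff.mp hip
          have : pairB F p = true := by
            unfold pairB
            rw [List.any_eq_true]
            refine ⟨i, hmemp, ?_⟩
            rw [hpos, Bool.true_and]
            exact decide_eq_true (by omega)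
          rw [this]
          simp
        · have hdec : decide (0 < F.count (bangS i)) = false := decide_eq_false hcb0
          rw [hdec, Bool.and_false, Bool.or_false]

lemma aLoop (F : List String) : ∀ (rest p : List String), F = p ++ rest →
    rest.foldl aStep (dropSkips (sigmaP F p) F, if pairB F p then "1" else "") =
      (dropSkips (sigmaP F F) F, if pairB F F then "1" else "") := by
  intro rest
  induction rest with
  | nil => intro p hp; rw [List.append_nil] at hp; subst hp; rfl
  | cons i rest ih =>
    intro p hp
    have hcnt : p.count i < F.count i := by
      rw [hp, List.count_append, List.count_cons_self]
      omega
    rw [List.foldl_cons, aStep_prefix F p i hcnt]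
    exact ih (p ++ [i]) (by rw [hp]; simp)

lemma sigmaP_nil (F : List String) (s : String) : sigmaP F [] s = 0 := by
  unfold sigmaP
  simp

lemma pairB_nil (F : List String) : pairB F [] = false := by
  unfold pairB
  simp

-- ---- A's second loop under Pre_: the fold reaches '1' iff it starts at '1' or meets '1' ----

lemma logicOr_step {i e : String} (hne : i ≠ "")
    (hd : PySem.Str.strIsdigit i = true → i = "0" ∨ i = "1") (hS : SState e) :
    SState (logicOr i e) ∧ (logicOr i e = "1" ↔ (i = "1" ∨ e = "1")) := by
  by_cases hdi : PySem.Str.strIsdigit i = true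
  · rcases hd hdi with h0 | h1
    · -- i = "0"
      subst h0
      rcases hS with he | he | hv | hv
      · subst he
        constructor
        · exact Or.inl (by decide)
        · constructor
          · intro h; exact absurd h (by decide)
          · rintro (h | h) <;> exact absurd h (by decide)
      · subst he
        constructor
        · exact Or.inr (Or.inl (by decide))
        · constructor
          · intro _; exact Or.inr rfl
          · intro _; decide
      all_goals {
        obtain ⟨hde, hne1, hnee⟩ := headVar_facts (by first | exact Or.inl hv | exact Or.inr hv)
        have h0e : ("0":String) ≠ e := by
          intro hc; rw [← hc] at hde; exact absurd hde (by decide)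
        have hres : logicOr "0" e = e := by
          unfold logicOr
          rw [if_neg h0e, if_neg (by rw [hde]; simp),
            if_neg (by decide), if_pos (by decide)]
        rw [hres]
        constructor
        · first | exact Or.inr (Or.inr (Or.inl hv)) | exact Or.inr (Or.inr (Or.inr hv))
        · constructor
          · intro h; exact absurd h hne1
          · rintro (h | h)
            · exact absurd h (by decide)
            · exact absurd h hne1 }
    · -- i = "1"
      subst h1
      rcases hS with he | he | hv | hv
      · subst he
        exact ⟨Or.inr (Or.inl (by decide)), by constructor <;> intro _ <;> first | exact Or.inl rfl | decide⟩
      · subst he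
        exact ⟨Or.inr (Or.inl (by decide)), by constructor <;> intro _ <;> first | exact Or.inl rfl | decide⟩
      all_goals {
        obtain ⟨hde, hne1, hnee⟩ := headVar_facts (by first | exact Or.inl hv | exact Or.inr hv)
        have h1e : ("1":String) ≠ e := fun hc => hne1 hc.symm
        have hres : logicOr "1" e = "1" := by
          unfold logicOr
          rw [if_neg h1e, if_neg (by rw [hde]; simp),
            if_neg (by decide), if_neg (by simp)]
        rw [hres]
        exact ⟨Or.inr (Or.inl rfl), by simp⟩ }
  · -- i not a digit string
    have hd' : PySem.Str.strIsdigit i = false := Bool.eq_false_iff.mpr hdi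
    have hi1 : i ≠ "1" := by
      intro hc; rw [hc] at hd'; exact absurd hd' (by decide)
    by_cases hv : PySem.Str.pyGet? i 0 = some 'x' ∨ PySem.Str.pyGet? i 0 = some '!'
    · -- i a variable/negation token
      rcases hS with he | he | hve | hve
      · subst he
        have hres : logicOr i "" = i := by
          unfold logicOr
          rw [if_neg hne,
            if_neg (by
              intro hc
              rw [Bool.and_eq_true] at hc
              exact absurd hc.1 (by decide)),
            if_pos hv, if_neg (by decide)]
        rw [hres]
        exact ⟨Or.inr (Or.inr hv), by simp [hi1]⟩
      · subst he
        have hres : logicOr i "1" = "1" := by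
          unfold logicOr
          rw [if_neg hi1, if_neg (by rw [hd']; simp), if_pos hv, if_pos rfl]
        rw [hres]
        exact ⟨Or.inr (Or.inl rfl), by simp⟩
      all_goals {
        obtain ⟨hde, hne1, hnee⟩ := headVar_facts (by first | exact Or.inl hve | exact Or.inr hve)
        have hres : logicOr i e = if i = e then i else i := by
          unfold logicOr
          by_cases hie : i = e
          · rw [if_pos hie, if_pos hie]
          · rw [if_neg hie, if_neg (by rw [hd']; simp), if_pos hv, if_neg hne1, if_neg hie]
        rw [hres, ite_self]
        exact ⟨Or.inr (Or.inr hv), by simp [hi1, hne1]⟩ }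
    · -- i neither digit nor headed 'x'/'!': logic_or keeps e (i ≠ '1')
      have hie : i ≠ e := by
        rcases hS with he | he | hve | hve
        · exact he ▸ hne
        · exact he ▸ hi1
        · intro hc; exact hv (Or.inl (hc ▸ hve))
        · intro hc; exact hv (Or.inr (hc ▸ hve))
      have hres : logicOr i e = e := by
        unfold logicOr
        rw [if_neg hie, if_neg (by rw [hd']; simp), if_neg hv, if_pos hi1]
      rw [hres]
      exact ⟨hS, by simp [hi1]⟩

lemma logicOr_fold (R : List String) : ∀ (e : String),
    (∀ i ∈ R, i ≠ "" ∧ (PySem.Str.strIsdigit i = true → i = "0" ∨ i = "1")) → SState e →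
    (R.foldl (fun acc i => logicOr i acc) e = "1" ↔ (e = "1" ∨ "1" ∈ R)) := by
  induction R with
  | nil => intro e _ _; simp
  | cons i R ih =>
    intro e hR hS
    obtain ⟨hne, hd⟩ := hR i List.mem_cons_self
    obtain ⟨hS', hiff⟩ := logicOr_step hne hd hS
    rw [List.foldl_cons,
      ih (logicOr i e) (fun j hj => hR j (List.mem_cons_of_mem _ hj)) hS', hiff]
    simp only [List.mem_cons]
    constructor
    · rintro ((h | h) | h)
      · exact Or.inr (Or.inl h.symm)
      · exact Or.inl h
      · exact Or.inr (Or.inr h)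
    · rintro (h | h | h)
      · exact Or.inl (Or.inr h)
      · exact Or.inl (Or.inl h.symm)
      · exact Or.inr h

-- ---- membership facts connecting both sides ----

lemma sigmaP_one (F : List String) : sigmaP F F "1" = 0 := by
  unfold sigmaP
  rw [if_neg (by decide), if_neg (by decide)]

lemma one_mem_dropSkips (F : List String) :
    ("1" ∈ dropSkips (sigmaP F F) F) ↔ "1" ∈ F := by
  rw [← List.count_pos_iff, ← List.count_pos_iff, count_dropSkips, sigmaP_one]
  omega

lemma pairB_iff (F : List String) :
    pairB F F = true ↔ ∃ t ∈ F, posB t = true ∧ bangS t ∈ F := by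
  unfold pairB
  rw [List.any_eq_true]
  constructor
  · rintro ⟨t, ht, hc⟩
    rw [Bool.and_eq_true, decide_eq_true_eq] at hc
    exact ⟨t, ht, hc.1, List.count_pos_iff.mp hc.2⟩
  · rintro ⟨t, ht, h1, h2⟩
    refine ⟨t, ht, ?_⟩
    rw [Bool.and_eq_true, decide_eq_true_eq]
    exact ⟨h1, List.count_pos_iff.mpr h2⟩

lemma alt_eq (F : List String) :
    check_on_extra_implicants_pdnf_alt F =
      (decide ("1" ∈ F) || pairB F F) := by
  unfold check_on_extra_implicants_pdnf_alt
  simp only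
  have hcont : ∀ x : String, PySem.Set.contains (PySem.Set.ofList F) x = true ↔ x ∈ F := by
    intro x
    rw [PySem.Set.contains_iff, PySem.Set.mem_ofList]
  by_cases h1 : "1" ∈ F
  · rw [if_pos ((hcont "1").mpr h1)]
    simp [h1]
  · rw [if_neg (fun hc => h1 ((hcont "1").mp hc))]
    rw [decide_eq_false h1, Bool.false_or]
    rw [Bool.eq_iff_iff]
    rw [List.any_eq_true, pairB_iff]
    constructor
    · rintro ⟨t, ht, hc⟩
      simp only [Bool.and_eq_true] at hc
      obtain ⟨⟨hnd, hnb⟩, hmem⟩ := hc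
      refine ⟨t, (PySem.Set.mem_ofList _ _).mp ht, ?_, (hcont _).mp hmem⟩
      unfold posB
      rw [hnd, hnb]
      rfl
    · rintro ⟨t, htF, hpos, hbF⟩
      refine ⟨t, (PySem.Set.mem_ofList _ _).mpr htF, ?_⟩
      unfold posB at hpos
      rw [Bool.and_eq_true] at hpos
      simp only [hpos.1, hpos.2, Bool.true_and]
      exact (hcont _).mpr hbF

-- ===== VERDICT (by name: the statement is the Claim_ definition above) =====
theorem check_on_extra_implicants_pdnf_spec : Claim_equal_check_on_extra_implicants_pdnf := by
  intro F _ hPre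
  unfold Spec_check_on_extra_implicants_pdnf
  unfold check_on_extra_implicants_pdnf
  simp only
  rw [show (F, "") = (dropSkips (sigmaP F []) F, if pairB F [] then "1" else "") by
    rw [dropSkips_congr (fun s => sigmaP_nil F s) F, dropSkips_zero, pairB_nil]
    rfl, aLoop F F [] (by simp)]
  have hS : SState (if pairB F F then "1" else "") := by
    by_cases h : pairB F F <;> simp [h, SState]
  have hcond : ∀ i ∈ dropSkips (sigmaP F F) F,
      i ≠ "" ∧ (PySem.Str.strIsdigit i = true → i = "0" ∨ i = "1") := by
    intro i hi
    have hiF : i ∈ F := mem_dropSkips hi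
    exact ⟨fun hc => hPre.1 (hc ▸ hiF), hPre.2 i hiF⟩
  rw [alt_eq]
  have hfold := logicOr_fold (dropSkips (sigmaP F F) F) _ hcond hS
  rw [decide_eq_decide.mpr (hfold.trans (or_congr_right (one_mem_dropSkips F)))]
  by_cases hp : pairB F F <;> by_cases h1 : "1" ∈ F <;>
    simp [hp, h1]
  infer_instance
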